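-- pv_equiv track=rewrite | github.com/mirulh/Educere_Scrapper | archive/backupspider.py | label_type
-- ===== SOURCE A (Python) =====
-- def label_type(trim_text, materialsFormat):
--     text = trim_text.replace(',', '').lower()
--     formatType = []
--     result = []
--
--     for format, formatItems in materialsFormat.items():
--         if any(word in text for word in formatItems):
--             formatType.append(format)
--
--     if len(formatType) < 1:
--         formatType.append("Other")
--
--     for x in formatType:
--         x_raw = x.lower().split()
--         s = "-".join(x_raw)
--         result.append({"label": x, "value": s})
--
--     return result
-- ===== SOURCE B (Python) =====
-- def label_type(trim_text, materialsFormat):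
--     # inverted index: group formats by keyword, test each distinct keyword against
--     # the text once, collect the matching formats into a set, then emit the
--     # formats in original dict order that made it into the set
--     text = trim_text.replace(',', '').lower()
--     by_word = {}
--     for fmt, items in materialsFormat.items():
--         for w in items:
--             by_word.setdefault(w, []).append(fmt)
--     matched = set()
--     for w, fmts in by_word.items():
--         if w in text:
--             matched.update(fmts)
--     labels = [f for f in materialsFormat if f in matched]
--     if not labels:
--         labels = ["Other"]
--     return [{"label": f, "value": "-".join(f.lower().split())} for f in labels]
-- ===== Notes on version B (the rewrite author's own statement) =====
-- stated objective: alternative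
-- what changed: B inverts the data: it builds a keyword-to-formats index (dict of lists), tests each distinct keyword against the text exactly once collecting matched format names into a set, and then reconstructs the output by filtering the original key order through that set, instead of A's per-format any() scan into an intermediate list.
import Mathlib
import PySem

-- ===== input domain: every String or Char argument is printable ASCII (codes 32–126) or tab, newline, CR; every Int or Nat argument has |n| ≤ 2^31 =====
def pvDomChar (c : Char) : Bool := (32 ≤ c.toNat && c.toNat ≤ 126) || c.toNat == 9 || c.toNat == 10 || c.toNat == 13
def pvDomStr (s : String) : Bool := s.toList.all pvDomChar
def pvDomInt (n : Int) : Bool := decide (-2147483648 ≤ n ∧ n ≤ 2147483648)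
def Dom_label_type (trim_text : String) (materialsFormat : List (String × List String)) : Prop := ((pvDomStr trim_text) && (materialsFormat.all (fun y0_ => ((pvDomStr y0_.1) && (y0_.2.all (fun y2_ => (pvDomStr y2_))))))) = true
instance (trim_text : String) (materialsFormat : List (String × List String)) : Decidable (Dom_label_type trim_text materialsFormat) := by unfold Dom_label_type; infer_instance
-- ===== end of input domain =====

-- B replaces A's per-format any() scan by an inverted keyword→formats index: each distinct keyword is tested against the text once, matched formats are collected into a set, and the output is rebuilt by filtering the original key order through that set.


-- ===== PORT A =====
-- {"label": x, "value": "-".join(x.lower().split())}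
def pvEntry (x : String) : List (String × String) :=
  [("label", x), ("value", PySem.Str.join "-" (PySem.Str.split₀ (PySem.Str.lower x)))]

def label_type (trim_text : String) (materialsFormat : List (String × List String)) : List (List (String × String)) :=
  let text := PySem.Str.lower (PySem.Str.replace trim_text "," "")
  let formatType : List String :=
    (PySem.Dict.ofList materialsFormat).items.foldl
      (fun acc p => if p.2.any (fun word => PySem.Str.isIn word text) then acc ++ [p.1] else acc) []
  let formatType := if formatType.length < 1 then formatType ++ ["Other"] else formatType
  formatType.foldl (fun res x => res ++ [pvEntry x]) []

-- ===== PORT B =====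
def label_type_alt (trim_text : String) (materialsFormat : List (String × List String)) : List (List (String × String)) :=
  let text := PySem.Str.lower (PySem.Str.replace trim_text "," "")
  -- by_word: inverted index word -> formats listing it (setdefault/append = Dict.modify with default [])
  let byWord : PySem.Dict String (List String) :=
    (PySem.Dict.ofList materialsFormat).items.foldl
      (fun d p => p.2.foldl (fun d w => d.modify w [] (fun v => v ++ [p.1])) d) PySem.Dict.empty
  -- matched: set of formats whose keyword list contains a keyword occurring in text
  let matched : PySem.Set String :=
    byWord.items.foldl
      (fun s q => if PySem.Str.isIn q.1 text then PySem.Set.update s q.2 else s) PySem.Set.empty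
  let labels := ((PySem.Dict.ofList materialsFormat).items.map Prod.fst).filter
      (fun f => PySem.Set.contains matched f)
  let labels := if labels = [] then ["Other"] else labels
  labels.map (fun f => [("label", f), ("value", PySem.Str.join "-" (PySem.Str.split₀ (PySem.Str.lower f)))])

-- ===== PRECONDITION & SPEC =====
def Spec_label_type (trim_text : String) (materialsFormat : List (String × List String)) (out : List (List (String × String))) : Prop := out = label_type_alt trim_text materialsFormat
instance (trim_text : String) (materialsFormat : List (String × List String)) (out : List (List (String × String))) : Decidable (Spec_label_type trim_text materialsFormat out) := by unfold Spec_label_type; infer_instance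

-- ===== CLAIM (what is proved, stated in full; the proofs are below) =====
def Claim_equal_label_type : Prop := ∀ (trim_text : String) (materialsFormat : List (String × List String)), Dom_label_type trim_text materialsFormat → Spec_label_type trim_text materialsFormat (label_type trim_text materialsFormat)

-- ===== LEMMAS AND PROOFS =====

-- membership in the set built by B's 'matched' loop
theorem pv_mem_matched_fold (P : String → Bool) (f : String) :
    ∀ (l : List (String × List String)) (s : PySem.Set String),
      f ∈ l.foldl (fun s q => if P q.1 then PySem.Set.update s q.2 else s) s
        ↔ f ∈ s ∨ ∃ q ∈ l, P q.1 = true ∧ f ∈ q.2 := by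
  intro l
  induction l with
  | nil => simp
  | cons h t ih =>
    intro s
    by_cases hp : P h.1 = true
    · simp only [List.foldl, hp, if_pos, ih, PySem.Set.mem_update]
      constructor
      · rintro (⟨hs | hh⟩ | ⟨q, hq, hPq, hf⟩)
        · exact Or.inl hs
        · exact Or.inr ⟨h, by simp, hp, hh⟩
        · exact Or.inr ⟨q, by simp [hq], hPq, hf⟩
      · rintro (hs | ⟨q, hq, hPq, hf⟩)
        · exact Or.inl (Or.inl hs)
        · rcases List.mem_cons.mp hq with rfl | hq
          · exact Or.inl (Or.inr hf)
          · exact Or.inr ⟨q, hq, hPq, hf⟩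
    · simp only [List.foldl, hp, if_neg, ih, Bool.not_eq_true]
      constructor
      · rintro (hs | ⟨q, hq, hPq, hf⟩)
        · exact Or.inl hs
        · exact Or.inr ⟨q, by simp [hq], hPq, hf⟩
      · rintro (hs | ⟨q, hq, hPq, hf⟩)
        · exact Or.inl hs
        · rcases List.mem_cons.mp hq with rfl | hq
          · exact absurd hPq hp
          · exact Or.inr ⟨q, hq, hPq, hf⟩

-- B's nested by_word loop is the grouping loop over the flattened (word, format) pairs
theorem pv_byWord_eq_flat (items : List (String × List String)) :
    items.foldl (fun d p => p.2.foldl (fun d w => d.modify w [] (fun v => v ++ [p.1])) d)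
        (PySem.Dict.empty : PySem.Dict String (List String))
      = (items.flatMap (fun pr => pr.2.map (fun w => (w, pr.1)))).foldl
          (fun d q => d.modify q.1 [] (fun v => v ++ [q.2])) PySem.Dict.empty := by
  rw [List.foldl_flatMap]
  apply PySem.List.foldl_congr_mem
  intro d p _
  rw [List.foldl_map]

-- the matched-set membership test agrees with A's any() test, on the dict's items
theorem pv_matched_iff (text : String) (items : List (String × List String))
    (hnd : (items.map Prod.fst).Nodup) (pr : String × List String) (hpr : pr ∈ items) :
    (∃ q ∈ ((items.flatMap (fun pr => pr.2.map (fun w => (w, pr.1)))).foldl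
                (fun d q => d.modify q.1 [] (fun v => v ++ [q.2]))
                (PySem.Dict.empty : PySem.Dict String (List String))).items,
        PySem.Str.isIn q.1 text = true ∧ pr.1 ∈ q.2)
      ↔ pr.2.any (fun word => PySem.Str.isIn word text) = true := by
  set pairs := items.flatMap (fun pr => pr.2.map (fun w => (w, pr.1))) with hpairs
  set byWord := pairs.foldl (fun d q => d.modify q.1 [] (fun v => v ++ [q.2]))
      (PySem.Dict.empty : PySem.Dict String (List String)) with hbw
  have hkeys : byWord.keys = PySem.Set.ofList (pairs.map Prod.fst) := by
    rw [hbw, PySem.Dict.keys_foldl_modify_key pairs Prod.fst [] (fun _ q => fun v => v ++ [q.2])]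
    rfl
  have hndk : byWord.keys.Nodup := by
    rw [hkeys]; exact PySem.Set.nodup_ofList _
  have hgetD : ∀ w, byWord.getD w [] = (pairs.filter (fun q => q.1 == w)).map Prod.snd := by
    intro w
    rw [hbw, PySem.Dict.getD_foldl_modify_append]
    simp [PySem.Dict.getD_empty]
  have hitems : byWord.items = byWord.keys.map (fun k => (k, byWord.getD k [])) :=
    PySem.Dict.items_eq_map_keys byWord hndk []
  constructor
  · rintro ⟨q, hq, hP, hf⟩
    rw [hitems] at hq
    rcases List.mem_map.mp hq with ⟨w, _, rfl⟩
    rw [hgetD] at hf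
    rcases List.mem_map.mp hf with ⟨q', hq', hsnd⟩
    rcases List.mem_filter.mp hq' with ⟨hq'p, hfst⟩
    -- q' ∈ pairs with q'.1 = w and q'.2 = pr.1
    rcases List.mem_flatMap.mp hq'p with ⟨pr', hpr', hq'm⟩
    rcases List.mem_map.mp hq'm with ⟨w', hw', hq'eq⟩
    have hpr'1 : pr'.1 = pr.1 := by rw [← hsnd, ← hq'eq]
    have : pr' = pr := List.inj_on_of_nodup_map hnd hpr' hpr hpr'1
    subst this
    refine List.any_eq_true.mpr ⟨w', hw', ?_⟩
    have hw'w : w' = w := by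
      have := beq_iff_eq.mp hfst
      rw [← hq'eq] at this; exact this
    rwa [hw'w]
  · intro hany
    rcases List.any_eq_true.mp hany with ⟨w, hw, hP⟩
    have hqmem : (w, pr.1) ∈ pairs :=
      List.mem_flatMap.mpr ⟨pr, hpr, List.mem_map.mpr ⟨w, hw, rfl⟩⟩
    refine ⟨(w, byWord.getD w []), ?_, hP, ?_⟩
    · rw [hitems]
      refine List.mem_map.mpr ⟨w, ?_, rfl⟩
      rw [hkeys]
      exact (PySem.Set.mem_ofList _ _).mpr (List.mem_map.mpr ⟨(w, pr.1), hqmem, rfl⟩)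
    · rw [hgetD]
      exact List.mem_map.mpr ⟨(w, pr.1), List.mem_filter.mpr ⟨hqmem, by simp⟩, rfl⟩

-- ===== VERDICT (by name: the statement is the Claim_ definition above) =====
theorem label_type_spec : Claim_equal_label_type := by
  intro trim_text materialsFormat _
  simp only [Spec_label_type, label_type, label_type_alt]
  set text := PySem.Str.lower (PySem.Str.replace trim_text "," "") with htext
  set items := (PySem.Dict.ofList materialsFormat).items with hitems
  set p : String × List String → Bool := fun q => q.2.any (fun word => PySem.Str.isIn word text)
    with hp
  have hnd : (items.map Prod.fst).Nodup := PySem.Dict.nodup_keys_ofList materialsFormat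
  -- A's first loop: filter-then-project
  rw [PySem.List.foldl_append_if p Prod.fst]
  -- B's labels = A's formatType
  have hlabels :
      (items.map Prod.fst).filter
          (fun f => PySem.Set.contains
            (((items.foldl (fun d pr => pr.2.foldl
                  (fun d w => d.modify w [] (fun v => v ++ [pr.1])) d)
                  (PySem.Dict.empty : PySem.Dict String (List String))).items).foldl
              (fun s q => if PySem.Str.isIn q.1 text then PySem.Set.update s q.2 else s)
              PySem.Set.empty) f)
        = (items.filter p).map Prod.fst := by
    rw [List.filter_map]
    apply congrArg (List.map Prod.fst)
    apply List.filter_congr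
    intro pr hpr
    simp only [Function.comp_apply, PySem.Set.contains]
    rw [pv_byWord_eq_flat]
    have hmem := pv_mem_matched_fold (fun w => PySem.Str.isIn w text) pr.1
      ((items.flatMap (fun pr => pr.2.map (fun w => (w, pr.1)))).foldl
        (fun d q => d.modify q.1 [] (fun v => v ++ [q.2])) PySem.Dict.empty).items
      PySem.Set.empty
    have hiff := pv_matched_iff text items hnd pr hpr
    have hiff2 : (pr.1 ∈ List.foldl
        (fun s q => if PySem.Str.isIn q.1 text then PySem.Set.update s q.2 else s)
        PySem.Set.empty
        ((items.flatMap (fun pr => pr.2.map (fun w => (w, pr.1)))).foldl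
          (fun d q => d.modify q.1 [] (fun v => v ++ [q.2])) PySem.Dict.empty).items)
        ↔ p pr = true := by
      rw [hmem]
      simp only [PySem.Set.empty, List.not_mem_nil, false_or]
      exact hiff
    rw [List.contains_eq_mem]
    cases hb : p pr with
    | true => exact decide_eq_true (hiff2.mpr hb)
    | false => exact decide_eq_false (fun hM => by rw [hiff2.mp hM] at hb; cases hb)
  rw [hlabels]
  -- both sides now agree list-by-list; handle the empty/nonempty fallback
  simp only [List.nil_append]
  generalize (items.filter p).map Prod.fst = L
  cases L with
  | nil => decide
  | cons h t =>
    rw [if_neg (by simp), if_neg (by simp)]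
    rw [PySem.List.foldl_append_singleton_eq_map]
    simp [pvEntry]
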